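-- pv_equiv track=rewrite | github.com/smart-storm/storm-can-node | computer/send.py | interpret_data
-- ===== SOURCE A (Python) =====
-- def interpret_data(string):
--     sensor = ''
--     value = 0
--     value_parsing = False
--     for char in string:
--         if char == '\r' or char == '\n':
--             break
--         elif not value_parsing:
--             if char != ':':
--                 sensor += char
--             else:
--                 value_parsing = True
--         else:
--             value *= 10
--             value += int(char)
--     return sensor, value
-- ===== SOURCE B (Python) =====
-- def interpret_data(string):
--     truncated = []
--     for ch in string:
--         if ch == '\r' or ch == '\n':
--             break
--         truncated.append(ch)
--     sensor, _, tail = ''.join(truncated).partition(':')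
--     value = 0
--     for c in tail:
--         value = value * 10 + int(c)
--     return sensor, value
-- ===== Notes on version B (the rewrite author's own statement) =====
-- stated objective: simpler
-- what changed: Replaced A's single boolean-flag state machine with a three-stage decomposition: truncate at the first CR/LF, partition the prefix at the first colon, then fold the digit tail into the value.
import Mathlib
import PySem

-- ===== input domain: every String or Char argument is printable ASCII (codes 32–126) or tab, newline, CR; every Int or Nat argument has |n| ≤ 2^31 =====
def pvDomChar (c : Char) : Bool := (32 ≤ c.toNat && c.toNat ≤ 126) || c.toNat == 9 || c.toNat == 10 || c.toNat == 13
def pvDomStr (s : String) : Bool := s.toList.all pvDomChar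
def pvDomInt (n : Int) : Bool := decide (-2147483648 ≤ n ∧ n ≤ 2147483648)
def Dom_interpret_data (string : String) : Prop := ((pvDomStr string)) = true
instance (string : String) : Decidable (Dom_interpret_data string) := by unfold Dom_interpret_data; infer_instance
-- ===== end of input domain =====

-- B truncates at the first '\r'/'\n', partitions the prefix at ':', and folds the digit tail; A runs one state-machine loop.
-- Equivalence of the return values is proved on Pre_ (where Python's int(char) does not raise).

-- ===== PORT A =====
-- int(char) for the single ASCII digit admitted by Pre_ (Python raises on non-digits; those inputs are outside Pre_)
def pvDigit (c : Char) : Int := (c.toNat : Int) - 48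

-- the for-loop of A with its break, sensor/value/value_parsing state
def interpretLoopA : List Char → String → Int → Bool → String × Int
  | [], sensor, value, _ => (sensor, value)
  | c :: cs, sensor, value, parsing =>
    if c = '\r' ∨ c = '\n' then (sensor, value)
    else if !parsing then
      if c ≠ ':' then interpretLoopA cs (sensor.push c) value parsing
      else interpretLoopA cs sensor value true
    else interpretLoopA cs sensor (value * 10 + pvDigit c) parsing

def interpret_data (string : String) : String × Int :=
  interpretLoopA string.toList "" 0 false

-- ===== PORT B =====
-- B's truncation loop: collect chars until the first '\r' or '\n'
def truncCRLF : List Char → List Char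
  | [] => []
  | c :: cs => if c = '\r' ∨ c = '\n' then [] else c :: truncCRLF cs

def interpret_data_alt (string : String) : String × Int :=
  let t := truncCRLF string.toList
  -- str.partition(':'), ported by hand: head before the first ':', tail after it
  let sensor := t.takeWhile (· ≠ ':')
  let tail := (t.dropWhile (· ≠ ':')).drop 1
  (sensor.asString, tail.foldl (fun v c => v * 10 + pvDigit c) 0)

-- ===== PRECONDITION & SPEC =====
-- Pre_ admits exactly the inputs where Python A returns: every char after the first ':'
-- (within the prefix before the first '\r'/'\n') is an ASCII digit, so int(char) never raises ValueError.
def Pre_interpret_data (string : String) : Prop :=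
  ((((string.toList.takeWhile (fun c => ¬(c = '\r' ∨ c = '\n'))).dropWhile (· ≠ ':')).drop 1).all
    (fun c => '0' ≤ c ∧ c ≤ '9')) = true
instance (string : String) : Decidable (Pre_interpret_data string) := by unfold Pre_interpret_data; infer_instance
def pvWitness_interpret_data : String := "temp:123"
def Spec_interpret_data (string : String) (out : String × Int) : Prop := out = interpret_data_alt string
instance (string : String) (out : String × Int) : Decidable (Spec_interpret_data string out) := by unfold Spec_interpret_data; infer_instance

-- ===== CLAIM (what is proved, stated in full; the proofs are below) =====
def Claim_equal_interpret_data : Prop := ∀ (string : String), Dom_interpret_data string → Pre_interpret_data string → Spec_interpret_data string (interpret_data string)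

-- ===== LEMMAS AND PROOFS =====
theorem interpretLoopA_parse (cs : List Char) : ∀ (s : String) (v : Int),
    interpretLoopA cs s v true =
      (s, (truncCRLF cs).foldl (fun v c => v * 10 + pvDigit c) v) := by
  induction cs with
  | nil => intro s v; rfl
  | cons c cs ih =>
    intro s v
    by_cases h : c = '\r' ∨ c = '\n' <;> simp [interpretLoopA, truncCRLF, h, ih]

theorem interpretLoopA_scan (cs : List Char) : ∀ (s : String) (v : Int),
    interpretLoopA cs s v false =
      ((s.toList ++ (truncCRLF cs).takeWhile (· ≠ ':')).asString,
        (((truncCRLF cs).dropWhile (· ≠ ':')).drop 1).foldl (fun v c => v * 10 + pvDigit c) v) := by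
  induction cs with
  | nil =>
    intro s v
    simp [interpretLoopA, truncCRLF, List.asString]
  | cons c cs ih =>
    intro s v
    by_cases h : c = '\r' ∨ c = '\n'
    · simp [interpretLoopA, truncCRLF, h, List.asString]
    · by_cases hc : c = ':'
      · subst hc
        simp [interpretLoopA, truncCRLF, h, interpretLoopA_parse, List.takeWhile_cons,
          List.dropWhile_cons, List.asString]
      · simp [interpretLoopA, truncCRLF, h, hc, ih, String.toList_push]

-- ===== VERDICT (by name: the statement is the Claim_ definition above) =====
theorem interpret_data_spec : Claim_equal_interpret_data := by
  intro s _ _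
  unfold Spec_interpret_data interpret_data interpret_data_alt
  rw [interpretLoopA_scan]
  simp
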